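-- pv_equiv track=rewrite | github.com/Nagakrishnachaitanya1/campusNav | CampusNav/app.py | crowd_avoided
-- ===== SOURCE A (Python) =====
-- def crowd_avoided(path, graph_data):
--     if len(path) < 2:
--         return False
--     for i in range(len(path) - 1):
--         for neighbor, _, crowd in graph_data.get(path[i], []):
--             if neighbor == path[i + 1] and crowd > 6:
--                 return True
--     return False
-- ===== SOURCE B (Python) =====
-- def crowd_avoided(path, graph_data):
--     crowded = set()
--     for u, neighbors in graph_data.items():
--         for neighbor, _, crowd in neighbors:
--             if crowd > 6:
--                 crowded.add((u, neighbor))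
--     return any(edge in crowded for edge in zip(path, path[1:]))
-- ===== Notes on version B (the rewrite author's own statement) =====
-- stated objective: alternative
-- what changed: Replaces the index loop with per-step dict lookup and inner neighbor scan by two differently-shaped passes: one pass over the whole graph building a set of crowded (u,neighbor) edge pairs, then a membership scan over zip(path, path[1:]); Pre_ only requires distinct keys in the association-list rendering of graph_data, automatic for a Python dict.
import Mathlib
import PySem

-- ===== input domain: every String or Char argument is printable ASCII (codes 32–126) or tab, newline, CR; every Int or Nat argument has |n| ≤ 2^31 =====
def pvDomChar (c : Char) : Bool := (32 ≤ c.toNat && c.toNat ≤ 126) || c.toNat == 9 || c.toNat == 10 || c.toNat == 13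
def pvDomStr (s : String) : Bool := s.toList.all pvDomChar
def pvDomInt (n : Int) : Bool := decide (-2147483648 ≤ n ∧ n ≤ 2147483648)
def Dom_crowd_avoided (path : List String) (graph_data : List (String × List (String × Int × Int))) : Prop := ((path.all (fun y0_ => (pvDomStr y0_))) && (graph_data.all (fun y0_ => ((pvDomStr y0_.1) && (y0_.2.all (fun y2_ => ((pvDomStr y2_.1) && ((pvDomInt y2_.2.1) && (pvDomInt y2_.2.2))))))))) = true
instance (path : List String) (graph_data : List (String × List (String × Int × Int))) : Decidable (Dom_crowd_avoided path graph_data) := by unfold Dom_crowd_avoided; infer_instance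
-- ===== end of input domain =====

-- B builds a set of crowded (u, neighbor) edge pairs in one pass over the whole graph, then scans
-- the consecutive pairs of the path for membership (objective: alternative decomposition).

-- ===== PORT A =====
-- transliteration of A: guard len(path) < 2, then for i in range(len(path)-1),
-- scan graph_data.get(path[i], []) (first-match dict lookup) for a crowded edge to path[i+1]
def crowd_avoided (path : List String) (graph_data : List (String × List (String × Int × Int))) : Bool :=
  if path.length < 2 then false
  else
    (PySem.List.pyRange 0 ((path.length : Int) - 1) 1).any (fun i =>
      ((PySem.Dict.mk graph_data).getD (PySem.List.pyGetD path i "") []).any (fun t =>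
        t.1 == PySem.List.pyGetD path (i + 1) "" && t.2.2 > 6))

-- ===== PORT B =====
-- transliteration of B: build the crowded-edge set, then any(edge in crowded for edge in zip(path, path[1:]))
def crowd_avoided_alt (path : List String) (graph_data : List (String × List (String × Int × Int))) : Bool :=
  let crowded : PySem.Set (String × String) :=
    graph_data.foldl (fun s e =>
      e.2.foldl (fun s t => if t.2.2 > 6 then PySem.Set.add s (e.1, t.1) else s) s)
      PySem.Set.empty
  (path.zip (path.drop 1)).any (fun edge => PySem.Set.contains crowded edge)

-- ===== PRECONDITION & SPEC =====
-- Pre_ requires the keys of the association list graph_data to be distinct — automatic for a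
-- Python dict, so no Python-reachable input is excluded; on a duplicate-key association list A's
-- first-match lookup and B's full-items pass could defensibly disagree.
def Pre_crowd_avoided (path : List String) (graph_data : List (String × List (String × Int × Int))) : Prop :=
  (graph_data.map Prod.fst).Nodup
instance (path : List String) (graph_data : List (String × List (String × Int × Int))) : Decidable (Pre_crowd_avoided path graph_data) := by unfold Pre_crowd_avoided; infer_instance

def pvWitness_crowd_avoided : List String × (List (String × List (String × Int × Int))) :=
  (["A", "B"], [("A", [("B", (3 : Int), (9 : Int))]), ("B", [])])

def Spec_crowd_avoided (path : List String) (graph_data : List (String × List (String × Int × Int))) (out : Bool) : Prop := out = crowd_avoided_alt path graph_data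
instance (path : List String) (graph_data : List (String × List (String × Int × Int))) (out : Bool) : Decidable (Spec_crowd_avoided path graph_data out) := by unfold Spec_crowd_avoided; infer_instance

-- ===== CLAIM (what is proved, stated in full; the proofs are below) =====
def Claim_equal_crowd_avoided : Prop := ∀ (path : List String) (graph_data : List (String × List (String × Int × Int))), Dom_crowd_avoided path graph_data → Pre_crowd_avoided path graph_data → Spec_crowd_avoided path graph_data (crowd_avoided path graph_data)

-- ===== LEMMAS AND PROOFS =====

-- membership in the inner crowded-edge fold over one adjacency list
theorem mem_inner_fold (u : String) (nbrs : List (String × Int × Int))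
    (s : PySem.Set (String × String)) (y : String × String) :
    y ∈ nbrs.foldl (fun s t => if t.2.2 > 6 then PySem.Set.add s (u, t.1) else s) s ↔
      y ∈ s ∨ ∃ t ∈ nbrs, t.2.2 > 6 ∧ y = (u, t.1) := by
  induction nbrs generalizing s with
  | nil => simp
  | cons hd tl ih =>
    simp only [List.foldl_cons, ih]
    split_ifs with h
    · simp only [PySem.Set.mem_add, List.mem_cons]
      constructor
      · rintro ((hy | hy) | ⟨t, ht, hc, hy⟩)
        · exact Or.inl hy
        · exact Or.inr ⟨hd, Or.inl rfl, h, hy⟩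
        · exact Or.inr ⟨t, Or.inr ht, hc, hy⟩
      · rintro (hy | ⟨t, (rfl | ht), hc, hy⟩)
        · exact Or.inl (Or.inl hy)
        · exact Or.inl (Or.inr hy)
        · exact Or.inr ⟨t, ht, hc, hy⟩
    · simp only [List.mem_cons]
      constructor
      · rintro (hy | ⟨t, ht, hc, hy⟩)
        · exact Or.inl hy
        · exact Or.inr ⟨t, Or.inr ht, hc, hy⟩
      · rintro (hy | ⟨t, (rfl | ht), hc, hy⟩)
        · exact Or.inl hy
        · exact absurd hc h
        · exact Or.inr ⟨t, ht, hc, hy⟩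

-- membership in the whole crowded-edge set built by B
theorem mem_crowded_fold (g : List (String × List (String × Int × Int)))
    (s : PySem.Set (String × String)) (y : String × String) :
    y ∈ g.foldl (fun s e =>
        e.2.foldl (fun s t => if t.2.2 > 6 then PySem.Set.add s (e.1, t.1) else s) s) s ↔
      y ∈ s ∨ ∃ e ∈ g, ∃ t ∈ e.2, t.2.2 > 6 ∧ y = (e.1, t.1) := by
  induction g generalizing s with
  | nil => simp
  | cons hd tl ih =>
    simp only [List.foldl_cons, ih, mem_inner_fold, List.mem_cons]
    constructor
    · rintro ((hy | ⟨t, ht, hc, hy⟩) | ⟨e, he, t, ht, hc, hy⟩)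
      · exact Or.inl hy
      · exact Or.inr ⟨hd, Or.inl rfl, t, ht, hc, hy⟩
      · exact Or.inr ⟨e, Or.inr he, t, ht, hc, hy⟩
    · rintro (hy | ⟨e, (rfl | he), t, ht, hc, hy⟩)
      · exact Or.inl (Or.inl hy)
      · exact Or.inl (Or.inr ⟨t, ht, hc, hy⟩)
      · exact Or.inr ⟨e, he, t, ht, hc, hy⟩

-- first-match dict lookup on a duplicate-free association list = membership
theorem mem_getD_mk (g : List (String × List (String × Int × Int)))
    (hnd : (g.map Prod.fst).Nodup) (u : String) (t : String × Int × Int) :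
    t ∈ (PySem.Dict.mk g).getD u [] ↔ ∃ e ∈ g, e.1 = u ∧ t ∈ e.2 := by
  induction g with
  | nil =>
    simp [PySem.Dict.getD_eq_get?_getD, PySem.Dict.get?]
  | cons hd tl ih =>
    simp only [List.map_cons, List.nodup_cons] at hnd
    rw [PySem.Dict.getD_eq_get?_getD, PySem.Dict.get?_mk_cons]
    by_cases h : hd.1 = u
    · subst h
      simp only [beq_self_eq_true, if_true, Option.getD_some, List.mem_cons]
      constructor
      · intro ht; exact ⟨hd, Or.inl rfl, rfl, ht⟩
      · rintro ⟨e, he, hk, ht⟩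
        rcases he with rfl | he
        · exact ht
        · exact absurd (hk ▸ List.mem_map_of_mem he) hnd.1
    · rw [if_neg (by simpa using h), ← PySem.Dict.getD_eq_get?_getD, ih hnd.2]
      simp only [List.mem_cons]
      constructor
      · rintro ⟨e, he, hk, ht⟩; exact ⟨e, Or.inr he, hk, ht⟩
      · rintro ⟨e, (rfl | he), hk, ht⟩
        · exact absurd hk h
        · exact ⟨e, he, hk, ht⟩

-- A is true iff some consecutive pair of the path is a crowded edge
theorem crowd_avoided_iff (path : List String) (g : List (String × List (String × Int × Int)))
    (hnd : (g.map Prod.fst).Nodup) :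
    crowd_avoided path g = true ↔
      ∃ i : Nat, ∃ hi : i + 1 < path.length,
        ∃ e ∈ g, ∃ t ∈ e.2, t.2.2 > 6 ∧ (path[i]'(by omega), path[i+1]'hi) = (e.1, t.1) := by
  unfold crowd_avoided
  split_ifs with hlen
  · simp only [false_iff]
    rintro ⟨i, hi, _⟩; omega
  · rw [List.any_eq_true]
    constructor
    · rintro ⟨i, hmem, hp⟩
      rw [PySem.List.mem_pyRange_one] at hmem
      obtain ⟨h0, h1⟩ := hmem
      have hlt : i.toNat + 1 < path.length := by omega
      rw [List.any_eq_true] at hp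
      obtain ⟨t, ht, hcond⟩ := hp
      rw [PySem.List.pyGetD_eq_getElem path "" h0 (by omega)] at ht
      rw [mem_getD_mk g hnd _ t] at ht
      obtain ⟨e, he, hk, htm⟩ := ht
      rw [PySem.List.pyGetD_eq_getElem path "" (by omega) (by omega)] at hcond
      simp only [Bool.and_eq_true, beq_iff_eq, decide_eq_true_eq] at hcond
      refine ⟨i.toNat, hlt, e, he, t, htm, hcond.2, ?_⟩
      have hidx : (i + 1).toNat = i.toNat + 1 := by omega
      simp only [hidx] at hcond
      rw [Prod.mk.injEq]
      exact ⟨hk.symm, hcond.1.symm⟩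
    · rintro ⟨i, hi, e, he, t, ht, hc, hpair⟩
      refine ⟨(i : Int), ?_, ?_⟩
      · rw [PySem.List.mem_pyRange_one]; constructor
        · omega
        · omega
      · rw [List.any_eq_true]
        rw [PySem.List.pyGetD_eq_getElem path "" (by omega) (by omega)]
        refine ⟨t, ?_, ?_⟩
        · rw [mem_getD_mk g hnd _ t]
          refine ⟨e, he, ?_, ht⟩
          have h1 := congrArg Prod.fst hpair
          simpa using h1.symm
        · rw [PySem.List.pyGetD_eq_getElem path "" (by omega) (by omega)]
          have h2 := congrArg Prod.snd hpair
          have hidx : ((i : Int) + 1).toNat = i + 1 := by omega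
          simp only [hidx, Bool.and_eq_true, beq_iff_eq, decide_eq_true_eq]
          exact ⟨by simpa using h2.symm, hc⟩

-- B is true iff some consecutive pair of the path is a crowded edge
theorem crowd_avoided_alt_iff (path : List String) (g : List (String × List (String × Int × Int))) :
    crowd_avoided_alt path g = true ↔
      ∃ i : Nat, ∃ hi : i + 1 < path.length,
        ∃ e ∈ g, ∃ t ∈ e.2, t.2.2 > 6 ∧ (path[i]'(by omega), path[i+1]'hi) = (e.1, t.1) := by
  unfold crowd_avoided_alt
  simp only [List.any_eq_true, PySem.Set.contains_iff]
  constructor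
  · rintro ⟨edge, hmem, hin⟩
    rw [mem_crowded_fold] at hin
    rcases hin with hin | ⟨e, he, t, ht, hc, hy⟩
    · simp [PySem.Set.empty] at hin
    · obtain ⟨i, hi, hedge⟩ := List.mem_iff_getElem.mp hmem
      rw [List.length_zip, List.length_drop] at hi
      have hi1 : i + 1 < path.length := by omega
      refine ⟨i, hi1, e, he, t, ht, hc, ?_⟩
      rw [List.getElem_zip] at hedge
      have hdrop : (path.drop 1)[i]'(by rw [List.length_drop]; omega) = path[i+1]'hi1 := by
        rw [List.getElem_drop]
        congr 1
        omega
      rw [hdrop] at hedge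
      rw [hedge, hy]
  · rintro ⟨i, hi, e, he, t, ht, hc, hpair⟩
    refine ⟨(path[i]'(by omega), path[i+1]'hi), ?_, ?_⟩
    · rw [List.mem_iff_getElem]
      refine ⟨i, by rw [List.length_zip, List.length_drop]; omega, ?_⟩
      rw [List.getElem_zip]
      congr 1
      rw [List.getElem_drop]
      congr 1
      omega
    · rw [mem_crowded_fold]
      exact Or.inr ⟨e, he, t, ht, hc, hpair⟩

-- ===== VERDICT (by name: the statement is the Claim_ definition above) =====
theorem crowd_avoided_spec : Claim_equal_crowd_avoided := by
  intro path g _ hpre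
  unfold Spec_crowd_avoided
  rcases h : crowd_avoided_alt path g with _ | _
  · rcases h' : crowd_avoided path g with _ | _
    · rfl
    · exfalso
      have hx := (crowd_avoided_iff path g hpre).mp h'
      rw [← crowd_avoided_alt_iff] at hx
      rw [h] at hx
      exact Bool.false_ne_true hx
  · rw [crowd_avoided_iff path g hpre, ← crowd_avoided_alt_iff, h]
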